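-- pv_equiv track=rewrite | github.com/njznn/Model-analysis-1 | 14 hexagonal potts model/narisi.py | generate_sequence_sodi
-- ===== SOURCE A (Python) =====
-- def generate_sequence_sodi(length):
--     sequence = []
--     num = 1
--     increment = 4
--
--     for i in range(length//2):
--         sequence.append(num)
--         sequence.append(num + 1)
--         num = num + increment
--
--     return sequence
-- ===== SOURCE B (Python) =====
-- def generate_sequence_sodi(length):
--     # closed form: element j of the output is 2*j + 1 for even j, 2*j for odd j
--     return [2*j + (1 - j % 2) for j in range(2*(length//2))]
-- ===== Notes on version B (the rewrite author's own statement) =====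
-- stated objective: simpler
-- what changed: Replaced the accumulator loop (running num/increment state, two appends per iteration) with a stateless list comprehension computing each element in closed form from its own index.
import Mathlib
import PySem

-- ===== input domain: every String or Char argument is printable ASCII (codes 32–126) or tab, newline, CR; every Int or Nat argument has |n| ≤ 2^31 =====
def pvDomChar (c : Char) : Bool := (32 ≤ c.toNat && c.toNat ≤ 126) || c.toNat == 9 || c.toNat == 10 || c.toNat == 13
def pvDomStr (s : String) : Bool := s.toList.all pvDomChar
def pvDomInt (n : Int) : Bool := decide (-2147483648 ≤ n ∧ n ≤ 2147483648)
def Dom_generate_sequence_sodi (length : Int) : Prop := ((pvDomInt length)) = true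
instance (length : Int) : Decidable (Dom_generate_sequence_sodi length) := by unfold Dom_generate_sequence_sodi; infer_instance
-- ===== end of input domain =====

-- B replaces A's accumulator loop with a closed-form index-to-value map (objective: simpler).

-- ===== PORT A =====
-- loop state: (sequence, num); increment is the constant 4
def generate_sequence_sodi (length : Int) : List Int :=
  let r := (PySem.List.pyRange 0 (PySem.Int.floordiv length 2) 1).foldl
    (fun (st : List Int × Int) _ =>
      let (sequence, num) := st
      (sequence ++ [num] ++ [num + 1], num + 4))
    ([], 1)
  r.1

-- ===== PORT B =====
def generate_sequence_sodi_alt (length : Int) : List Int :=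
  (PySem.List.pyRange 0 (2 * PySem.Int.floordiv length 2) 1).map
    (fun j => 2 * j + (1 - PySem.Int.mod j 2))

-- ===== PRECONDITION & SPEC =====
def Spec_generate_sequence_sodi (length : Int) (out : List Int) : Prop := out = generate_sequence_sodi_alt length
instance (length : Int) (out : List Int) : Decidable (Spec_generate_sequence_sodi length out) := by unfold Spec_generate_sequence_sodi; infer_instance

-- ===== CLAIM (what is proved, stated in full; the proofs are below) =====
def Claim_equal_generate_sequence_sodi : Prop := ∀ (length : Int), Dom_generate_sequence_sodi length → Spec_generate_sequence_sodi length (generate_sequence_sodi length)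

-- ===== LEMMAS AND PROOFS =====

-- canonical form both sides reach: pairs (4i+1, 4i+2) for i < k
def pvPairs (k : Nat) : List Int :=
  (List.range k).flatMap (fun i => [4 * (i : Int) + 1, 4 * (i : Int) + 2])

lemma loopA (k : Nat) :
    (PySem.List.pyRange 0 (k : Int) 1).foldl
      (fun (st : List Int × Int) _ =>
        let (sequence, num) := st
        (sequence ++ [num] ++ [num + 1], num + 4))
      ([], 1)
    = (pvPairs k, 1 + 4 * (k : Int)) := by
  induction k with
  | zero => simp [pvPairs]
  | succ k ih =>
      have h : PySem.List.pyRange 0 ((k : Int) + 1) 1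
          = PySem.List.pyRange 0 (k : Int) 1 ++ [(k : Int)] := by
        exact PySem.List.pyRange_one_succ_right (by positivity)
      push_cast
      rw [h, List.foldl_append, ih]
      simp [pvPairs, List.range_succ]
      and_intros <;> push_cast <;> ring

lemma loopB (k : Nat) :
    (PySem.List.pyRange 0 (2 * (k : Int)) 1).map
      (fun j => 2 * j + (1 - PySem.Int.mod j 2)) = pvPairs k := by
  induction k with
  | zero => simp [pvPairs]
  | succ k ih =>
      have h1 : (0 : Int) ≤ 2 * k := by positivity
      have h2 : (0 : Int) ≤ 2 * k + 1 := by positivity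
      have e : (2 : Int) * ((k : Int) + 1) = (2 * k + 1) + 1 := by ring
      push_cast
      rw [e, PySem.List.pyRange_one_succ_right h2,
          PySem.List.pyRange_one_succ_right h1]
      rw [List.map_append, List.map_append, ih]
      have m1 : PySem.Int.mod (2 * (k : Int)) 2 = 0 := by
        rw [PySem.Int.mod_eq_emod_of_pos (by norm_num)]; omega
      have m2 : PySem.Int.mod (2 * (k : Int) + 1) 2 = 1 := by
        rw [PySem.Int.mod_eq_emod_of_pos (by norm_num)]; omega
      simp only [List.map_cons, List.map_nil, m1, m2]
      simp [pvPairs, List.range_succ]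
      and_intros <;> push_cast <;> ring

-- ===== VERDICT (by name: the statement is the Claim_ definition above) =====
theorem generate_sequence_sodi_spec : Claim_equal_generate_sequence_sodi := by
  intro length _
  unfold Spec_generate_sequence_sodi generate_sequence_sodi generate_sequence_sodi_alt
  set n := PySem.Int.floordiv length 2 with hn
  by_cases h : n ≤ 0
  · rw [PySem.List.pyRange_one_eq_nil h, PySem.List.pyRange_one_eq_nil (by omega)]
    simp
  · obtain ⟨k, hk⟩ : ∃ k : Nat, n = (k : Int) := ⟨n.toNat, by omega⟩
    rw [hk]
    simp only [loopA k, loopB k]
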